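-- pv_equiv track=rewrite | github.com/pwilkins05/TTHAssignB | alphacode.py | alphacode
-- ===== SOURCE A (Python) =====
-- CONSONANTS = "bcdfghjklmnpqrstvwyz"
--
-- VOWELS = "aeiou"
--
-- def alphacode(pin):
-- 	"""
-- 	Convert numeric pin code to an
-- 	easily pronounced mnemonic.
-- 	args:
-- 		pin:  code as positive integer
-- 	returns:
-- 		mnemonic as string
-- 	"""
-- 	mnemonic = ""
-- 	while pin > 0:
-- 		pin2 = pin % 100
-- 		pin = pin // 100
-- 		x = pin2 // 5
-- 		y = pin2 % 5
-- 		z = CONSONANTS[x]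
-- 		w = VOWELS[y]
-- 		mnemonic = z + w + mnemonic
-- 	return mnemonic
-- ===== SOURCE B (Python) =====
-- CONSONANTS = "bcdfghjklmnpqrstvwyz"
--
-- VOWELS = "aeiou"
--
-- def alphacode(pin):
--     """Recursive base-100 decomposition: high chunks first, then this chunk's pair."""
--     if pin <= 0:
--         return ""
--     q, r = divmod(pin, 100)
--     return alphacode(q) + CONSONANTS[r // 5] + VOWELS[r % 5]
-- ===== Notes on version B (the rewrite author's own statement) =====
-- stated objective: simpler
-- what changed: Replaced the while-loop with string-prepend accumulator by a direct recursion over the base-100 digit structure (recurse on pin // 100, then append the current chunk's consonant-vowel pair via divmod), eliminating the mutable accumulator.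
import Mathlib
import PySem

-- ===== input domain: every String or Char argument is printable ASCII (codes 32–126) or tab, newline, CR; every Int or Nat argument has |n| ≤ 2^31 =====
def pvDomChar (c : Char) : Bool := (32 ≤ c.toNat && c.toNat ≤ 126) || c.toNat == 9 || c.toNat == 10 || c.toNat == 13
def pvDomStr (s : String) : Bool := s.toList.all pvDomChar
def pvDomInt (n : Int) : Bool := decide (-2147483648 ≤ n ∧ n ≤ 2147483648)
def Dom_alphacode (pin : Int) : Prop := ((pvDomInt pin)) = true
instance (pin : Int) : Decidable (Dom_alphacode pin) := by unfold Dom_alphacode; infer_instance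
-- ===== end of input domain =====

-- ===== PORT A =====
-- B changes: recursion over base-100 digits instead of a while-loop with a prepend accumulator (simpler).
-- Ports build the mnemonic as List Char (PySem convention); String.ofList at the end.
def pvCONSONANTS : List Char := "bcdfghjklmnpqrstvwyz".toList
def pvVOWELS : List Char := "aeiou".toList

def alphacodeLoop (pin : Int) (mnemonic : List Char) : List Char :=
  if pin > 0 then
    let pin2 := PySem.Int.mod pin 100
    let pin' := PySem.Int.floordiv pin 100
    let x := PySem.Int.floordiv pin2 5
    let y := PySem.Int.mod pin2 5
    let z := (PySem.List.pyGet? pvCONSONANTS x).getD ' '  -- index always in range (0 ≤ x < 20)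
    let w := (PySem.List.pyGet? pvVOWELS y).getD ' '      -- index always in range (0 ≤ y < 5)
    alphacodeLoop pin' (z :: w :: mnemonic)
  else mnemonic
termination_by pin.toNat
decreasing_by
  simp only [PySem.Int.floordiv_eq_ediv_of_pos (a := pin) (b := 100) (by omega)]
  omega

def alphacode (pin : Int) : String := String.ofList (alphacodeLoop pin [])

-- ===== PORT B =====
def alphacodeAltL (pin : Int) : List Char :=
  if pin ≤ 0 then []
  else
    let q := PySem.Int.floordiv pin 100
    let r := PySem.Int.mod pin 100
    alphacodeAltL q ++
      [(PySem.List.pyGet? pvCONSONANTS (PySem.Int.floordiv r 5)).getD ' ',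
       (PySem.List.pyGet? pvVOWELS (PySem.Int.mod r 5)).getD ' ']
termination_by pin.toNat
decreasing_by
  simp only [PySem.Int.floordiv_eq_ediv_of_pos (a := pin) (b := 100) (by omega)]
  omega

def alphacode_alt (pin : Int) : String := String.ofList (alphacodeAltL pin)

-- ===== PRECONDITION & SPEC =====
def Spec_alphacode (pin : Int) (out : String) : Prop := out = alphacode_alt pin
instance (pin : Int) (out : String) : Decidable (Spec_alphacode pin out) := by unfold Spec_alphacode; infer_instance

-- ===== CLAIM (what is proved, stated in full; the proofs are below) =====
def Claim_equal_alphacode : Prop := ∀ (pin : Int), Dom_alphacode pin → Spec_alphacode pin (alphacode pin)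

-- ===== LEMMAS AND PROOFS =====
theorem alphacodeLoop_eq_altL_append (n : Nat) :
    ∀ (pin : Int) (m : List Char), pin.toNat ≤ n →
      alphacodeLoop pin m = alphacodeAltL pin ++ m := by
  induction n with
  | zero =>
    intro pin m h
    rw [alphacodeLoop, alphacodeAltL]
    have hle : pin ≤ 0 := by omega
    simp [hle, show ¬ pin > 0 by omega]
  | succ n ih =>
    intro pin m h
    rw [alphacodeLoop, alphacodeAltL]
    by_cases hp : pin > 0
    · simp only [hp, dif_pos, show ¬ pin ≤ 0 by omega, dif_neg, not_false_iff]
      rw [ih]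
      · simp
      · have := PySem.Int.floordiv_eq_ediv_of_pos (a := pin) (b := 100) (by omega)
        rw [this]; omega
    · simp [hp, show pin ≤ 0 by omega]

-- ===== VERDICT (by name: the statement is the Claim_ definition above) =====
theorem alphacode_spec : Claim_equal_alphacode := by
  intro pin _
  unfold Spec_alphacode alphacode alphacode_alt
  rw [alphacodeLoop_eq_altL_append pin.toNat pin [] (le_refl _)]
  simp
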